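-- pv_equiv track=rewrite | github.com/sachinnaikar2004-bit/face-recognition-attendance-system | backend/app/utils/csv_export.py | validate_export_data
-- ===== SOURCE A (Python) =====
-- from typing import List, Dict, Any, Optional
--
-- def validate_export_data(data: List[Dict[str, Any]]) -> bool:
--     """Validate data for export."""
--     try:
--         if not data:
--             return False
--
--         # Check if all rows have the same structure
--         if len(data) > 1:
--             first_keys = set(data[0].keys())
--             for row in data[1:]:
--                 if set(row.keys()) != first_keys:
--                     return False
--
--         return True
--
--     except Exception:
--         return False
-- ===== SOURCE B (Python) =====
-- def validate_export_data(data):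
--     """Validate data for export: non-empty and all rows share one key structure."""
--     try:
--         return len({frozenset(row.keys()) for row in data}) == 1
--     except Exception:
--         return False
-- ===== Notes on version B (the rewrite author's own statement) =====
-- stated objective: simpler
-- what changed: Replaced the empty-check plus compare-each-row-to-the-first early-exit loop by one expression: collect the set of distinct key-signatures (frozensets of keys) over all rows and test that exactly one exists; empty input gives zero signatures and so False, as in A.
import Mathlib
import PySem

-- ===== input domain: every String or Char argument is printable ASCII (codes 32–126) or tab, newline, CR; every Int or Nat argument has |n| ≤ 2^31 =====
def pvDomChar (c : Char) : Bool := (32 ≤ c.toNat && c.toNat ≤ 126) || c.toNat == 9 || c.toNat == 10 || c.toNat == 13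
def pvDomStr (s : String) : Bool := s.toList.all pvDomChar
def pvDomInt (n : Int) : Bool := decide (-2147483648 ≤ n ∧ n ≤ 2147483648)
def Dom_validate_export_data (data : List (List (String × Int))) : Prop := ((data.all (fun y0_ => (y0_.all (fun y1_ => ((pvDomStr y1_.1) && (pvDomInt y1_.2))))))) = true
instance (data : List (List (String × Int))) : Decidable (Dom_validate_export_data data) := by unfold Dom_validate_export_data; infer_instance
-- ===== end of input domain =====

-- B replaces A's compare-each-row-to-the-first loop (with its empty/length guards) by one
-- expression counting the distinct key-signatures of all rows; objective: simpler.

-- ===== PORT A =====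
-- the 'for row in data[1:]' loop with its early 'return False'
def validate_export_data_loop (firstKeys : PySem.Set String) : List (List (String × Int)) → Bool
  | [] => true
  | row :: rest =>
      if PySem.Set.equal (PySem.Set.ofList (row.map Prod.fst)) firstKeys then
        validate_export_data_loop firstKeys rest
      else false

def validate_export_data (data : List (List (String × Int))) : Bool :=
  match data with
  | [] => false
  | d0 :: rest =>
      if (d0 :: rest).length > 1 then
        validate_export_data_loop (PySem.Set.ofList (d0.map Prod.fst)) rest
      else true

-- ===== PORT B =====
-- frozenset(row.keys()) ported as its canonical value: the sorted list of the distinct keys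
def rowSig (row : List (String × Int)) : List String :=
  PySem.List.sorted (PySem.Set.ofList (row.map Prod.fst)) (fun x => x) false

def validate_export_data_alt (data : List (List (String × Int))) : Bool :=
  decide ((PySem.Set.ofList (data.map rowSig)).length = 1)

-- ===== PRECONDITION & SPEC =====
def Spec_validate_export_data (data : List (List (String × Int))) (out : Bool) : Prop := out = validate_export_data_alt data
instance (data : List (List (String × Int))) (out : Bool) : Decidable (Spec_validate_export_data data out) := by unfold Spec_validate_export_data; infer_instance

-- ===== CLAIM (what is proved, stated in full; the proofs are below) =====
def Claim_equal_validate_export_data : Prop := ∀ (data : List (List (String × Int))), Dom_validate_export_data data → Spec_validate_export_data data (validate_export_data data)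

-- ===== LEMMAS AND PROOFS =====

-- two Python sets are equal iff their canonical sorted forms coincide
theorem setEqual_iff_sorted_eq (a b : List String) :
    PySem.Set.equal (PySem.Set.ofList a) (PySem.Set.ofList b) = true ↔
      PySem.List.sorted (PySem.Set.ofList a) (fun x => x) false
        = PySem.List.sorted (PySem.Set.ofList b) (fun x => x) false := by
  rw [PySem.Set.equal_iff, PySem.List.sorted_id_eq_sorted_id_iff_perm]
  constructor
  · intro h
    exact (List.perm_ext_iff_of_nodup (PySem.Set.nodup_ofList a) (PySem.Set.nodup_ofList b)).2 h
  · intro h x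
    exact h.mem_iff

-- set(x :: xs) has exactly one element iff every element of xs equals x
theorem ofList_length_one (x : List String) (xs : List (List String)) :
    (PySem.Set.ofList (x :: xs)).length = 1 ↔ ∀ y ∈ xs, y = x := by
  rw [PySem.Set.ofList_cons]
  have hlen : (x :: (PySem.Set.ofList xs).discard x).length = 1 ↔
      ((PySem.Set.ofList xs).discard x) = [] := by
    simp [List.length_eq_zero_iff]
  rw [hlen, List.eq_nil_iff_forall_not_mem]
  constructor
  · intro h y hy
    by_contra hne
    exact h y (by rw [PySem.Set.mem_discard]; exact ⟨(PySem.Set.mem_ofList _ _).2 hy, hne⟩)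
  · intro h y hy
    rw [PySem.Set.mem_discard, PySem.Set.mem_ofList] at hy
    exact hy.2 (h y hy.1)

-- A's loop decides "every row's signature equals the first row's signature"
theorem loop_eq (d0 : List (String × Int)) (rest : List (List (String × Int))) :
    validate_export_data_loop (PySem.Set.ofList (d0.map Prod.fst)) rest
      = decide (∀ row ∈ rest, rowSig row = rowSig d0) := by
  induction rest with
  | nil => simp [validate_export_data_loop]
  | cons r rs ih =>
      simp only [validate_export_data_loop, ih]
      by_cases h : PySem.Set.equal (PySem.Set.ofList (r.map Prod.fst))
          (PySem.Set.ofList (d0.map Prod.fst)) = true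
      · have hs : rowSig r = rowSig d0 := (setEqual_iff_sorted_eq _ _).1 h
        simp [h, hs]
      · have hs : rowSig r ≠ rowSig d0 := fun hc => h ((setEqual_iff_sorted_eq _ _).2 hc)
        simp [h, hs]

-- ===== VERDICT (by name: the statement is the Claim_ definition above) =====
theorem validate_export_data_spec : Claim_equal_validate_export_data := by
  intro data _
  unfold Spec_validate_export_data validate_export_data validate_export_data_alt
  match data with
  | [] => simp [PySem.Set.ofList]
  | [d0] => simp [PySem.Set.ofList, PySem.Set.add]
  | d0 :: r :: rs =>
      simp only [List.length_cons, List.map_cons, gt_iff_lt]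
      rw [if_pos (by omega), loop_eq]
      have h := ofList_length_one (rowSig d0) ((r :: rs).map rowSig)
      simp only [List.map_cons] at h
      simp [h]
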